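-- pv_equiv track=rewrite | github.com/PanJianTing/LeetCode | 1629_SlowestKey.py | slowestKey_my
-- ===== SOURCE A (Python) =====
-- def slowestKey_my(releaseTimes: list[int], keysPressed: str) -> str:
--
--     beforeTime = 0;
--     timeDic = {}
--
--     for i in range(len(keysPressed)):
--         key = keysPressed[i];
--         time = releaseTimes[i] - beforeTime
--         if time in timeDic:
--             timeDic[time].add(key)
--         else:
--             timeDic[time] = set(key)
--         beforeTime = releaseTimes[i]
--
--     timeDic = sorted(timeDic.items(), key = lambda x:x[0], reverse=True)
--
--     return sorted(next(iter(timeDic))[1])[-1]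
-- ===== SOURCE B (Python) =====
-- def slowestKey_my(releaseTimes: list[int], keysPressed: str) -> str:
--     best = None  # (duration, key) of the current winner
--     prev = 0
--     for i, k in enumerate(keysPressed):
--         dur = releaseTimes[i] - prev
--         prev = releaseTimes[i]
--         if best is None or dur > best[0] or (dur == best[0] and k > best[1]):
--             best = (dur, k)
--     return '' if best is None else best[1]
-- ===== Notes on version B (the rewrite author's own statement) =====
-- stated objective: simpler
-- what changed: A groups keys into a duration-keyed dict of sets and then sorts the items and the winning set; B is a single linear pass keeping the best (duration, key) pair with an explicit tie branch, building no dict, sets or sorted lists (no per-element dict/set allocation and no final sorts).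
import Mathlib
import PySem

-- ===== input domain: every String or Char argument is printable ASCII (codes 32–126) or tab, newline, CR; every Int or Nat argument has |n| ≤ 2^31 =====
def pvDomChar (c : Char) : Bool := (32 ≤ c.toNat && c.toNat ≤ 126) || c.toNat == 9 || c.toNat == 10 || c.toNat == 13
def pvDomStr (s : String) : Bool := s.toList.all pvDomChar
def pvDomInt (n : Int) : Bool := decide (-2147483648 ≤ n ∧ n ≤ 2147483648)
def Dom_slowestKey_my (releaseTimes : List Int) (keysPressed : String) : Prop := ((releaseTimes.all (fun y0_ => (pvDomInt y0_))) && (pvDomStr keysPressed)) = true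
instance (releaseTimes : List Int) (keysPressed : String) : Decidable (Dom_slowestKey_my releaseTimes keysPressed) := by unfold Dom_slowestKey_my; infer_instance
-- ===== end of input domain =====

-- B replaces A's duration→set-of-keys dict plus two sorts by a single pass keeping the best
-- (duration, key) pair (objective: simpler; return value only — neither version mutates its arguments).

-- ===== PORT A =====
-- loop body of A's 'for i in range(len(keysPressed))' (state = (beforeTime, timeDic))
def slowestKey_my_body (releaseTimes : List Int) (cs : List Char)
    (st : Int × PySem.Dict Int (PySem.Set Char)) (i : Int) :
    Int × PySem.Dict Int (PySem.Set Char) :=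
  let key := PySem.List.pyGetD cs i ' '
  let time := PySem.List.pyGetD releaseTimes i 0 - st.1
  let timeDic :=
    if st.2.contains time then
      st.2.modify time [] (fun s => PySem.Set.add s key)
    else
      st.2.insert time (PySem.Set.ofList [key])
  (PySem.List.pyGetD releaseTimes i 0, timeDic)

def slowestKey_my (releaseTimes : List Int) (keysPressed : String) : String :=
  -- timeDic = sorted(timeDic.items(), key = lambda x: x[0], reverse=True)
  match PySem.List.sorted ((PySem.List.pyRange 0 (PySem.Str.len keysPressed) 1).foldl
      (slowestKey_my_body releaseTimes keysPressed.toList) (0, PySem.Dict.empty)).2.items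
      (fun x => x.1) true with
  | [] => ""   -- next(iter([])) raises StopIteration; excluded by Pre_
  | p :: _ => String.ofList [PySem.List.pyGetD (PySem.List.sorted p.2 (fun c => c) false) (-1) ' ']

-- ===== PORT B =====
-- loop body of B's 'for i, k in enumerate(keysPressed)' (state = (prev, best))
def slowestKey_my_alt_body (releaseTimes : List Int)
    (st : Int × Option (Int × Char)) (ik : Int × Char) : Int × Option (Int × Char) :=
  let dur := PySem.List.pyGetD releaseTimes ik.1 0 - st.1
  let best :=
    match st.2 with
    | none => some (dur, ik.2)
    | some b => if b.1 < dur ∨ (dur = b.1 ∧ b.2 < ik.2) then some (dur, ik.2) else some b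
  (PySem.List.pyGetD releaseTimes ik.1 0, best)

def slowestKey_my_alt (releaseTimes : List Int) (keysPressed : String) : String :=
  match ((PySem.List.enumerate keysPressed.toList 0).foldl
      (slowestKey_my_alt_body releaseTimes) (0, none)).2 with
  | none => ""
  | some b => String.ofList [b.2]

-- ===== PRECONDITION & SPEC =====
-- Pre_ excludes exactly the inputs on which A raises: an empty keysPressed (StopIteration from
-- next(iter(...))) and a releaseTimes shorter than keysPressed (IndexError).
def Pre_slowestKey_my (releaseTimes : List Int) (keysPressed : String) : Prop :=
  keysPressed.toList ≠ [] ∧ keysPressed.toList.length ≤ releaseTimes.length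
instance (releaseTimes : List Int) (keysPressed : String) : Decidable (Pre_slowestKey_my releaseTimes keysPressed) := by unfold Pre_slowestKey_my; infer_instance

def pvWitness_slowestKey_my : List Int × String := ([9, 29, 49, 50], "cbcd")

def Spec_slowestKey_my (releaseTimes : List Int) (keysPressed : String) (out : String) : Prop := out = slowestKey_my_alt releaseTimes keysPressed
instance (releaseTimes : List Int) (keysPressed : String) (out : String) : Decidable (Spec_slowestKey_my releaseTimes keysPressed out) := by unfold Spec_slowestKey_my; infer_instance

-- ===== CLAIM (what is proved, stated in full; the proofs are below) =====
def Claim_equal_slowestKey_my : Prop := ∀ (releaseTimes : List Int) (keysPressed : String), Dom_slowestKey_my releaseTimes keysPressed → Pre_slowestKey_my releaseTimes keysPressed → Spec_slowestKey_my releaseTimes keysPressed (slowestKey_my releaseTimes keysPressed)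


-- ===== LEMMAS AND PROOFS =====

-- abstract one-step functions over the (releaseTime, key) pair stream
def pvAStep (st : Int × PySem.Dict Int (PySem.Set Char)) (q : Int × Char) :
    Int × PySem.Dict Int (PySem.Set Char) :=
  let time := q.1 - st.1
  (q.1, if st.2.contains time then st.2.modify time [] (fun s => PySem.Set.add s q.2)
        else st.2.insert time (PySem.Set.ofList [q.2]))

def pvBStep (st : Int × Option (Int × Char)) (q : Int × Char) : Int × Option (Int × Char) :=
  let dur := q.1 - st.1
  (q.1, match st.2 with
        | none => some (dur, q.2)
        | some b => if b.1 < dur ∨ (dur = b.1 ∧ b.2 < q.2) then some (dur, q.2) else some b)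

theorem pv_pyGetD_append {α : Type} (cs : List α) (c : α) (d : α) (i : Int)
    (h0 : 0 ≤ i) (h1 : i < (cs.length : Int)) :
    PySem.List.pyGetD (cs ++ [c]) i d = PySem.List.pyGetD cs i d := by
  rw [PySem.List.pyGetD_eq_getElem _ d h0 (by simp; omega),
      PySem.List.pyGetD_eq_getElem _ d h0 h1]
  rw [List.getElem_append_left (by omega)]

theorem pv_zip_append (cs : List Char) : ∀ (ts : List Int) (c : Char)
    (h : cs.length < ts.length),
    ts.zip (cs ++ [c]) = ts.zip cs ++ [(ts[cs.length], c)] := by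
  induction cs with
  | nil =>
    intro ts c h
    match ts with
    | t :: ts' => simp
  | cons a cs ih =>
    intro ts c h
    match ts with
    | t :: ts' =>
      simp only [List.length_cons] at h
      simp [List.zip_cons_cons, ih ts' c (by omega)]

theorem pvA_fold (cs : List Char) : ∀ (ts : List Int)
    (st : Int × PySem.Dict Int (PySem.Set Char)), cs.length ≤ ts.length →
    (PySem.List.pyRange 0 (cs.length : Int) 1).foldl (slowestKey_my_body ts cs) st
      = (ts.zip cs).foldl pvAStep st := by
  induction cs using List.reverseRecOn with
  | nil => intro ts st _; simp [PySem.List.pyRange_one_eq_nil]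
  | append_singleton cs c ih =>
    intro ts st h
    simp only [List.length_append, List.length_singleton] at h ⊢
    have hn : ((cs.length + 1 : Nat) : Int) = (cs.length : Int) + 1 := by push_cast; ring
    rw [hn, PySem.List.pyRange_one_succ_right (by positivity), List.foldl_append,
        PySem.List.foldl_congr_mem _ _ (slowestKey_my_body ts cs) st (by
          intro acc x hx
          rw [PySem.List.mem_pyRange_one] at hx
          unfold slowestKey_my_body
          rw [pv_pyGetD_append cs c ' ' x hx.1 hx.2]),
        ih ts st (by omega),
        pv_zip_append cs ts c (by omega), List.foldl_append]
    simp only [List.foldl_cons, List.foldl_nil]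
    unfold slowestKey_my_body pvAStep
    rw [PySem.List.pyGetD_eq_getElem _ ' ' (by positivity) (by simp),
        PySem.List.pyGetD_eq_getElem _ 0 (by positivity) (by exact_mod_cast by omega)]
    simp

theorem pvB_fold (cs : List Char) : ∀ (ts : List Int)
    (st : Int × Option (Int × Char)), cs.length ≤ ts.length →
    (PySem.List.enumerate cs 0).foldl (slowestKey_my_alt_body ts) st
      = (ts.zip cs).foldl pvBStep st := by
  induction cs using List.reverseRecOn with
  | nil => intro ts st _; simp [PySem.List.enumerate]
  | append_singleton cs c ih =>
    intro ts st h
    simp only [List.length_append, List.length_singleton] at h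
    rw [PySem.List.enumerate_append, List.foldl_append, ih ts st (by omega),
        pv_zip_append cs ts c (by omega), List.foldl_append]
    simp only [PySem.List.enumerate, List.foldl_cons, List.foldl_nil, zero_add]
    unfold slowestKey_my_alt_body pvBStep
    rw [PySem.List.pyGetD_eq_getElem _ 0 (by positivity) (by exact_mod_cast by omega)]
    simp

-- the common loop invariant: the dict built by A determines the best pair kept by B
def pvInv (d : PySem.Dict Int (PySem.Set Char)) (best : Option (Int × Char)) : Prop :=
  d.keys.Nodup ∧
  match best with
  | none => d.items = []
  | some b => b.1 ∈ d.keys ∧ (∀ k ∈ d.keys, k ≤ b.1) ∧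
      b.2 ∈ d.getD b.1 [] ∧ (∀ x ∈ d.getD b.1 [], x ≤ b.2)

theorem pvInv_step (prev : Int) (d : PySem.Dict Int (PySem.Set Char))
    (best : Option (Int × Char)) (q : Int × Char) (h : pvInv d best) :
    pvInv (pvAStep (prev, d) q).2 (pvBStep (prev, best) q).2 := by
  obtain ⟨hnd, hb⟩ := h
  cases best with
  | none =>
    have hd : d = PySem.Dict.empty := PySem.Dict.ext hb
    subst hd
    have hcf : ¬ ((PySem.Dict.empty : PySem.Dict Int (PySem.Set Char)).contains
        (q.1 - prev) = true) := by simp [PySem.Dict.contains_empty]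
    simp only [pvAStep, pvBStep, pvInv]
    rw [if_neg hcf]
    refine ⟨PySem.Dict.nodup_keys_insert _ _ _ PySem.Dict.nodup_keys_empty,
      (PySem.Dict.mem_keys_insert _ _ _ _).mpr (Or.inl rfl), ?_, ?_, ?_⟩
    · intro k hk
      rcases (PySem.Dict.mem_keys_insert _ _ _ _).mp hk with rfl | hk'
      · exact le_refl _
      · rw [PySem.Dict.keys_empty] at hk'
        exact absurd hk' List.not_mem_nil
    · rw [PySem.Dict.getD_insert_self]
      exact (PySem.Set.mem_ofList _ _).mpr (List.mem_singleton.mpr rfl)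
    · intro x hx
      rw [PySem.Dict.getD_insert_self] at hx
      have hx' := (PySem.Set.mem_ofList _ _).mp hx
      rw [List.mem_singleton] at hx'
      exact hx' ▸ le_refl _
  | some b =>
    obtain ⟨m, c0⟩ := b
    obtain ⟨hmem, hub, hcmem, hcub⟩ := hb
    dsimp only at hmem hub hcmem hcub
    simp only [pvAStep, pvBStep, pvInv]
    by_cases h1 : m < q.1 - prev
    · have hcf : ¬ (d.contains (q.1 - prev) = true) := by
        rw [PySem.Dict.contains_iff_mem_keys]
        intro hk
        exact absurd (hub _ hk) (by omega)
      rw [if_neg hcf, if_pos (Or.inl h1)]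
      dsimp only
      refine ⟨PySem.Dict.nodup_keys_insert _ _ _ hnd,
        (PySem.Dict.mem_keys_insert _ _ _ _).mpr (Or.inl rfl), ?_, ?_, ?_⟩
      · intro k hk
        rcases (PySem.Dict.mem_keys_insert _ _ _ _).mp hk with rfl | hk'
        · exact le_refl _
        · exact le_of_lt (lt_of_le_of_lt (hub _ hk') h1)
      · rw [PySem.Dict.getD_insert_self]
        exact (PySem.Set.mem_ofList _ _).mpr (List.mem_singleton.mpr rfl)
      · intro x hx
        rw [PySem.Dict.getD_insert_self] at hx
        have hx' := (PySem.Set.mem_ofList _ _).mp hx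
        rw [List.mem_singleton] at hx'
        exact hx' ▸ le_refl _
    · by_cases h2 : q.1 - prev = m
      · have hcont : d.contains (q.1 - prev) = true := by
          rw [PySem.Dict.contains_iff_mem_keys, h2]
          exact hmem
        rw [if_pos hcont, h2]
        have hgd : (d.modify m [] (fun s => PySem.Set.add s q.2)).getD m []
            = PySem.Set.add (d.getD m []) q.2 := PySem.Dict.getD_modify_self _ _ _ _
        have hkeys : ∀ k, k ∈ (d.modify m [] (fun s => PySem.Set.add s q.2)).keys ↔
            k = m ∨ k ∈ d.keys := by
          intro k
          rw [PySem.Dict.keys_modify, PySem.Dict.mem_keys_insert]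
        have hknd : (d.modify m [] (fun s => PySem.Set.add s q.2)).keys.Nodup := by
          rw [PySem.Dict.keys_modify]
          exact PySem.Dict.nodup_keys_insert _ _ _ hnd
        by_cases h3 : c0 < q.2
        · rw [if_pos (Or.inr ⟨rfl, h3⟩)]
          dsimp only
          refine ⟨hknd, (hkeys _).mpr (Or.inl rfl), ?_, ?_, ?_⟩
          · intro k hk
            rcases (hkeys k).mp hk with rfl | hk'
            · exact le_refl _
            · exact hub _ hk'
          · rw [hgd]
            exact (PySem.Set.mem_add _ _ _).mpr (Or.inr rfl)
          · intro x hx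
            rw [hgd] at hx
            rcases (PySem.Set.mem_add _ _ _).mp hx with hx' | rfl
            · exact le_of_lt (lt_of_le_of_lt (hcub _ hx') h3)
            · exact le_refl _
        · have hno : ¬ (m < m ∨ (m = m ∧ c0 < q.2)) := by
            intro hcase
            rcases hcase with hl | ⟨_, h3'⟩
            · exact absurd hl (lt_irrefl m)
            · exact h3 h3'
          rw [if_neg hno]
          dsimp only
          refine ⟨hknd, (hkeys _).mpr (Or.inr hmem), ?_, ?_, ?_⟩
          · intro k hk
            rcases (hkeys k).mp hk with rfl | hk'
            · exact le_refl _
            · exact hub _ hk'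
          · rw [hgd]
            exact (PySem.Set.mem_add _ _ _).mpr (Or.inl hcmem)
          · intro x hx
            rw [hgd] at hx
            rcases (PySem.Set.mem_add _ _ _).mp hx with hx' | rfl
            · exact hcub _ hx'
            · exact not_lt.mp h3
      · have hlt : q.1 - prev < m := lt_of_le_of_ne (not_lt.mp h1) h2
        have hne : m ≠ q.1 - prev := fun hh => h2 hh.symm
        have hno : ¬ (m < q.1 - prev ∨ (q.1 - prev = m ∧ c0 < q.2)) := by
          intro hcase
          rcases hcase with hl | ⟨he, _⟩
          · exact h1 hl
          · exact h2 he
        rw [if_neg hno]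
        by_cases hc : d.contains (q.1 - prev) = true
        · rw [if_pos hc]
          dsimp only
          refine ⟨?_, ?_, ?_, ?_, ?_⟩
          · rw [PySem.Dict.keys_modify]
            exact PySem.Dict.nodup_keys_insert _ _ _ hnd
          · rw [PySem.Dict.keys_modify, PySem.Dict.mem_keys_insert]
            exact Or.inr hmem
          · intro k hk
            rw [PySem.Dict.keys_modify, PySem.Dict.mem_keys_insert] at hk
            rcases hk with rfl | hk'
            · exact le_of_lt hlt
            · exact hub _ hk'
          · rw [PySem.Dict.getD_modify_of_ne d [] (fun s => PySem.Set.add s q.2) hne]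
            exact hcmem
          · intro x hx
            rw [PySem.Dict.getD_modify_of_ne d [] (fun s => PySem.Set.add s q.2) hne] at hx
            exact hcub _ hx
        · rw [if_neg hc]
          dsimp only
          refine ⟨PySem.Dict.nodup_keys_insert _ _ _ hnd,
            (PySem.Dict.mem_keys_insert _ _ _ _).mpr (Or.inr hmem), ?_, ?_, ?_⟩
          · intro k hk
            rcases (PySem.Dict.mem_keys_insert _ _ _ _).mp hk with rfl | hk'
            · exact le_of_lt hlt
            · exact hub _ hk'
          · rw [PySem.Dict.getD_insert_of_ne _ _ _ hne]
            exact hcmem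
          · intro x hx
            rw [PySem.Dict.getD_insert_of_ne _ _ _ hne] at hx
            exact hcub _ hx

theorem pvFold_inv (l : List (Int × Char)) : ∀ (prev : Int)
    (d : PySem.Dict Int (PySem.Set Char)) (best : Option (Int × Char)), pvInv d best →
    pvInv (l.foldl pvAStep (prev, d)).2 (l.foldl pvBStep (prev, best)).2 := by
  induction l with
  | nil => intro prev d best h; exact h
  | cons q l ih =>
    intro prev d best h
    simp only [List.foldl_cons]
    have ha : pvAStep (prev, d) q = (q.1, (pvAStep (prev, d) q).2) := rfl
    have hbq : pvBStep (prev, best) q = (q.1, (pvBStep (prev, best) q).2) := rfl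
    rw [ha, hbq]
    exact ih q.1 _ _ (pvInv_step prev d best q h)

theorem pvBStep_some (st : Int × Option (Int × Char)) (q : Int × Char) :
    (pvBStep st q).2.isSome := by
  obtain ⟨p, ob⟩ := st
  cases ob with
  | none => rfl
  | some b =>
    show (if b.1 < q.1 - p ∨ (q.1 - p = b.1 ∧ b.2 < q.2) then some (q.1 - p, q.2)
      else some b).isSome = true
    split <;> rfl

theorem pvFold_some (l : List (Int × Char)) : ∀ (st : Int × Option (Int × Char)),
    st.2.isSome → ((l.foldl pvBStep st).2).isSome := by
  induction l with
  | nil => intro st h; exact h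
  | cons q l ih => intro st _; exact ih _ (pvBStep_some st q)

theorem pv_le_getLast (l : List Char) : l.Pairwise (fun a b => a ≤ b) →
    ∀ x ∈ l, ∀ (h : l ≠ []), x ≤ l.getLast h := by
  induction l with
  | nil => simp
  | cons a t ih =>
    intro hp x hx h
    cases t with
    | nil =>
      rw [List.mem_singleton] at hx
      simp [hx, List.getLast]
    | cons b t' =>
      rw [List.getLast_cons (by simp)]
      rcases List.mem_cons.mp hx with rfl | hx'
      · exact (List.pairwise_cons.mp hp).1 _ (List.getLast_mem _)
      · exact ih (List.pairwise_cons.mp hp).2 x hx' (by simp)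

theorem pvFinal (d : PySem.Dict Int (PySem.Set Char)) (m : Int) (c : Char)
    (h : pvInv d (some (m, c))) :
    (match PySem.List.sorted d.items (fun x => x.1) true with
     | [] => ""
     | p :: _ => String.ofList
        [PySem.List.pyGetD (PySem.List.sorted p.2 (fun c => c) false) (-1) ' ']) =
    String.ofList [c] := by
  obtain ⟨hnd, hmem, hub, hcmem, hcub⟩ := h
  have hitems : d.items ≠ [] := by
    intro h0
    have hk : d.keys = [] := by simp [PySem.Dict.keys, h0]
    rw [hk] at hmem
    simp at hmem
  cases hL : PySem.List.sorted d.items (fun x => x.1) true with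
  | nil => exact absurd ((PySem.List.sorted_eq_nil_iff _ _ _).mp hL) hitems
  | cons p t =>
    dsimp only
    have hpmem : p ∈ d.items := (PySem.List.mem_sorted _ _ _ _).mp
      (hL ▸ List.mem_cons_self)
    have hge := PySem.List.key_head_sorted_rev_ge d.items (fun x => x.1) hL
    have hp1 : p.1 = m := by
      have h1 : p.1 ∈ d.keys := PySem.Dict.mem_keys_of_mem_items d hpmem
      obtain ⟨qq, hq, hq1⟩ := List.mem_map.mp (show m ∈ d.items.map (·.1) from hmem)
      have h3 : m ≤ p.1 := hq1 ▸ hge qq hq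
      have h2 : p.1 ≤ m := hub _ h1
      omega
    have hgd : d.getD m [] = p.2 := by
      have hp : (m, p.2) ∈ d.items := by rw [← hp1]; exact hpmem
      exact PySem.Dict.getD_of_mem_items d hp hnd []
    rw [hgd] at hcmem hcub
    have hSne : PySem.List.sorted p.2 (fun c => c) false ≠ [] := by
      rw [Ne, PySem.List.sorted_eq_nil_iff]
      intro h0
      rw [h0] at hcmem
      exact absurd hcmem (List.not_mem_nil)
    rw [PySem.List.pyGetD_neg_one _ ' ' hSne]
    have hlast : (PySem.List.sorted p.2 (fun c => c) false).getLast hSne = c := by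
      apply le_antisymm
      · exact hcub _ ((PySem.List.mem_sorted _ _ _ _).mp (List.getLast_mem hSne))
      · exact pv_le_getLast _ (PySem.List.sorted_pairwise p.2 (fun c => c)) c
          ((PySem.List.mem_sorted _ _ _ _).mpr hcmem) hSne
    rw [hlast]

-- ===== VERDICT =====
theorem slowestKey_my_spec : Claim_equal_slowestKey_my := by
  intro ts ks _ hpre
  obtain ⟨hne, hlen⟩ := hpre
  unfold Spec_slowestKey_my slowestKey_my slowestKey_my_alt
  rw [PySem.Str.len_eq]
  rw [pvA_fold ks.toList ts _ hlen, pvB_fold ks.toList ts _ hlen]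
  have hzne : ts.zip ks.toList ≠ [] := by
    cases hcs : ks.toList with
    | nil => exact absurd hcs hne
    | cons a cs' =>
      rw [hcs] at hlen
      cases ts with
      | nil => simp at hlen
      | cons t ts' => simp
  have hinv0 : pvInv PySem.Dict.empty none := ⟨PySem.Dict.nodup_keys_empty, rfl⟩
  have hinv := pvFold_inv (ts.zip ks.toList) 0 PySem.Dict.empty none hinv0
  have hsome : ((ts.zip ks.toList).foldl pvBStep (0, none)).2.isSome := by
    cases hzl : ts.zip ks.toList with
    | nil => exact absurd hzl hzne
    | cons q l' =>
      simp only [List.foldl_cons]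
      exact pvFold_some l' _ (pvBStep_some (0, none) q)
  obtain ⟨b, hbm⟩ := Option.isSome_iff_exists.mp hsome
  rw [hbm] at hinv
  rw [hbm]
  have hb : b = (b.1, b.2) := rfl
  rw [hb] at hinv
  exact pvFinal _ b.1 b.2 hinv
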